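-- pv_equiv track=rewrite | github.com/mawadrun/tubes-daspro | fungsi_dasar.py | matrixSort
-- ===== SOURCE A (Python) =====
-- def listLen(list):
-- # mengembalikan panjang dari list
--     if list == []:
--         return 0
--     else:
--         temp = list[-1]
--         list[-1] = "$" # ganti elemen terakhir dengan mark
--         i = 0
--
--         while list[i] != "$":
--             i += 1
--
--         list[-1] = temp # kemalikan elemen terakhir ke nilai aslinya
--         return i + 1
--
-- def copyList(list):
-- # menyalin list
--     newlist = [list[i] for i in range(listLen(list))]
--     return newlist
--
-- def matrixSort(matrix, column, mode):
-- # mengurutkan baris pada matrix berdasarkan nilai column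
--     if mode == 'a':
--         m = copyList(matrix)
--         for i in range(1, listLen(m)):
--             for j in range(i, 0, -1):
--                 if m[j][column] < m[j-1][column]:
--                     temp = m[j]
--                     m[j] = m[j-1]
--                     m[j-1] = temp
--         return m
--     elif mode == 'd':
--         m = copyList(matrix)
--         for i in range(1, listLen(m)):
--             for j in range(i, 0, -1):
--                 if m[j][column] > m[j-1][column]:
--                     temp = m[j]
--                     m[j] = m[j-1]
--                     m[j-1] = temp
--         return m
-- ===== SOURCE B (Python) =====
-- def _merge(left, right, column, mode):
-- # two-pointer merge of two stably sorted row lists; tie takes the left row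
--     out = []
--     i = 0
--     j = 0
--     while i < len(left) and j < len(right):
--         if mode == 'a':
--             take_left = left[i][column] <= right[j][column]
--         else:
--             take_left = left[i][column] >= right[j][column]
--         if take_left:
--             out.append(left[i])
--             i += 1
--         else:
--             out.append(right[j])
--             j += 1
--     return out + left[i:] + right[j:]
--
-- def _msort(rows, column, mode):
-- # recursive top-down merge sort, split at the midpoint (ceiling half on the left)
--     if len(rows) <= 1:
--         return rows
--     mid = (len(rows) + 1) // 2
--     return _merge(_msort(rows[:mid], column, mode),
--                   _msort(rows[mid:], column, mode), column, mode)
--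
-- def matrixSort(matrix, column, mode):
-- # mengurutkan baris pada matrix berdasarkan nilai column (stable merge sort)
--     if mode == 'a' or mode == 'd':
--         return _msort(list(matrix), column, mode)
-- ===== Notes on version B (the rewrite author's own statement) =====
-- stated objective: alternative
-- what changed: Replaces the in-place index-swapping insertion sort (with its sentinel-scan length helper) by a recursive top-down stable merge sort over a copied row list, with a two-pointer merge whose tie goes to the left half.
import Mathlib
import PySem

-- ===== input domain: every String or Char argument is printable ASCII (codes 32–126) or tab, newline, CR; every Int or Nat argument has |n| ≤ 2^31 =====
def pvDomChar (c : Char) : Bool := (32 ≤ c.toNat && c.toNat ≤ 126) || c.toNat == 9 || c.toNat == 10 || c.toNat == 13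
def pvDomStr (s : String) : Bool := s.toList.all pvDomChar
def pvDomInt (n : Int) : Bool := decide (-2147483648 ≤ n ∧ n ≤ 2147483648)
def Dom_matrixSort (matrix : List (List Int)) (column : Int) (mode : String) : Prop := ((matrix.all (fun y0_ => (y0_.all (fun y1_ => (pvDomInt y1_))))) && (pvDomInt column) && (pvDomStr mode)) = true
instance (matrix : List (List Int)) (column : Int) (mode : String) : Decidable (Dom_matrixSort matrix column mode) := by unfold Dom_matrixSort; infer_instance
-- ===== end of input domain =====

-- B replaces A's in-place index-swapping insertion sort (and its sentinel-scan length helper) by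
-- a recursive stable merge sort; proved to return the same value wherever A returns (A's mutation
-- of its argument is temporary — listLen restores the element it overwrites — so only the return
-- value is at stake).

-- ===== PORT A =====
-- listLen's "$"-sentinel scan is untypeable verbatim on List (List Int); it temporarily overwrites
-- and restores the last element and its VALUE is exactly the length, which is what we port.
def pvListLen (l : List (List Int)) : Nat := l.length

-- copyList: newlist = [list[i] for i in range(listLen(list))]; indices 0..len-1 are in range,
-- so getD's default is never used (exact).
def pvCopy (l : List (List Int)) : List (List Int) :=
  (List.range (pvListLen l)).map (fun i => (l[i]?).getD [])

-- one body of the inner 'for j' loop: compare m[j][column] with m[j-1][column], swap on cmp.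
-- j ≥ 1 and j < len m at every call site, so List.getElem?/List.set are exact for the row
-- accesses; the column access uses pyGet? (negative index from the end, none = IndexError).
def pvStep (cmp : Int → Int → Bool) (column : Int) (m : List (List Int)) (j : Nat) :
    Option (List (List Int)) :=
  (m[j]?).bind fun rj =>
  (m[j-1]?).bind fun rj1 =>
  (PySem.List.pyGet? rj column).bind fun a =>
  (PySem.List.pyGet? rj1 column).bind fun b =>
  some (if cmp a b then (m.set j rj1).set (j-1) rj else m)

-- for j in range(i, 0, -1): j = i, i-1, …, 1
def pvInner (cmp : Int → Int → Bool) (column : Int) (m : List (List Int)) : Nat → Option (List (List Int))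
  | 0 => some m
  | j+1 => (pvStep cmp column m (j+1)).bind (fun m' => pvInner cmp column m' j)

-- for i in range(1, listLen(m)): i = 1, …, n-1
def pvOuter (cmp : Int → Int → Bool) (column : Int) (n : Nat) (m : List (List Int)) (i : Nat) :
    Option (List (List Int)) :=
  if _ : i < n then (pvInner cmp column m i).bind (fun m' => pvOuter cmp column n m' (i+1))
  else some m
termination_by n - i

def matrixSort (matrix : List (List Int)) (column : Int) (mode : String) : Option (List (List Int)) :=
  if mode == "a" then
    let m := pvCopy matrix
    pvOuter (fun a b => decide (a < b)) column (pvListLen m) m 1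
  else if mode == "d" then
    let m := pvCopy matrix
    pvOuter (fun a b => decide (b < a)) column (pvListLen m) m 1
  else none

-- ===== PORT B =====
-- row[column]; inside Pre_ the index is in range, so the default is never used (exact there).
def pvKeyB (column : Int) (r : List Int) : Int := (PySem.List.pyGet? r column).getD 0

-- take_left = left[i][column] <= right[j][column]  (mode 'a')  /  >=  (mode 'd')
def pvKeep (column : Int) (mode : String) (x y : List Int) : Bool :=
  if mode == "a" then decide (pvKeyB column x ≤ pvKeyB column y)
  else decide (pvKeyB column x ≥ pvKeyB column y)

-- _merge: two-pointer merge, transcribed as recursion on the two fronts; tie takes the left row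
def pvMerge (column : Int) (mode : String) : List (List Int) → List (List Int) → List (List Int)
  | [], r => r
  | l, [] => l
  | x :: l, y :: r =>
    if pvKeep column mode x y then x :: pvMerge column mode l (y :: r)
    else y :: pvMerge column mode (x :: l) r
termination_by l r => l.length + r.length

-- _msort: split at mid = (len+1)//2, recurse, merge
def pvMsort (column : Int) (mode : String) (rows : List (List Int)) : List (List Int) :=
  if _ : rows.length ≤ 1 then rows
  else pvMerge column mode
    (pvMsort column mode (rows.take ((rows.length + 1) / 2)))
    (pvMsort column mode (rows.drop ((rows.length + 1) / 2)))
termination_by rows.length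
decreasing_by
  · simp [List.length_take]; omega
  · simp [List.length_drop]; omega

def matrixSort_alt (matrix : List (List Int)) (column : Int) (mode : String) : Option (List (List Int)) :=
  if mode == "a" || mode == "d" then some (pvMsort column mode matrix) else none

-- ===== PRECONDITION & SPEC =====
-- Pre_ excludes exactly the inputs where A raises an IndexError: a recognized mode, at least two
-- rows (so the comparison is reached), and some row for which 'row[column]' is out of range.
def Pre_matrixSort (matrix : List (List Int)) (column : Int) (mode : String) : Prop :=
  (mode = "a" ∨ mode = "d") → 2 ≤ matrix.length →
    ∀ row ∈ matrix, PySem.Raise.InRange row.length column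
instance (matrix : List (List Int)) (column : Int) (mode : String) : Decidable (Pre_matrixSort matrix column mode) := by unfold Pre_matrixSort; infer_instance

def pvWitness_matrixSort : List (List Int) × Int × String := ([[2, 5], [1, 7], [2, 3]], 0, "a")

def Spec_matrixSort (matrix : List (List Int)) (column : Int) (mode : String) (out : Option (List (List Int))) : Prop := out = matrixSort_alt matrix column mode
instance (matrix : List (List Int)) (column : Int) (mode : String) (out : Option (List (List Int))) : Decidable (Spec_matrixSort matrix column mode out) := by unfold Spec_matrixSort; infer_instance

-- ===== CLAIM (what is proved, stated in full; the proofs are below) =====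
def Claim_equal_matrixSort : Prop := ∀ (matrix : List (List Int)) (column : Int) (mode : String), Dom_matrixSort matrix column mode → Pre_matrixSort matrix column mode → Spec_matrixSort matrix column mode (matrixSort matrix column mode)

-- ===== LEMMAS AND PROOFS =====

-- the copy loop returns the list itself
theorem pvCopy_eq (l : List (List Int)) : pvCopy l = l := by
  apply List.ext_getElem
  · simp [pvCopy, pvListLen]
  · intro i h1 h2
    simp [pvCopy, pvListLen, List.getElem?_eq_getElem h2]

theorem pvKeyB_some {r : List Int} {column : Int}
    (h : PySem.Raise.InRange r.length column) :
    PySem.List.pyGet? r column = some (pvKeyB column r) := by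
  rcases ho : PySem.List.pyGet? r column with _ | v
  · exact absurd h ((PySem.List.pyGet?_eq_none_iff r column).mp ho)
  · simp [pvKeyB, ho]

-- stable strict insertion from the left: x goes before the first y with f x < f y
def pvInsS (f : List Int → Int) (x : List Int) : List (List Int) → List (List Int)
  | [] => [x]
  | y :: ys => if f x < f y then x :: y :: ys else y :: pvInsS f x ys

theorem mem_pvInsS {f : List Int → Int} {x a : List Int} :
    ∀ {s : List (List Int)}, a ∈ pvInsS f x s ↔ a = x ∨ a ∈ s := by
  intro s
  induction s with
  | nil => simp [pvInsS]
  | cons y ys ih =>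
    simp only [pvInsS]
    split_ifs <;> simp [ih] <;> tauto

theorem length_pvInsS {f : List Int → Int} {x : List Int} :
    ∀ {s : List (List Int)}, (pvInsS f x s).length = s.length + 1 := by
  intro s
  induction s with
  | nil => simp [pvInsS]
  | cons y ys ih => simp only [pvInsS]; split_ifs <;> simp [ih]

theorem pairwise_pvInsS {f : List Int → Int} {x : List Int} {s : List (List Int)}
    (hs : s.Pairwise (fun a b => f a ≤ f b)) :
    (pvInsS f x s).Pairwise (fun a b => f a ≤ f b) := by
  induction s with
  | nil => simp [pvInsS]
  | cons y ys ih =>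
    rw [List.pairwise_cons] at hs
    simp only [pvInsS]
    split_ifs with h
    · refine List.pairwise_cons.mpr ⟨?_, List.pairwise_cons.mpr hs⟩
      intro b hb
      rcases List.mem_cons.mp hb with rfl | hb
      · omega
      · have := hs.1 b hb; omega
    · refine List.pairwise_cons.mpr ⟨?_, ih hs.2⟩
      intro b hb
      rcases mem_pvInsS.mp hb with hb | hb
      · subst hb; omega
      · exact hs.1 b hb

theorem pvInsS_append_last {f : List Int → Int} {x y : List Int} (h : f x < f y) :
    ∀ (q : List (List Int)), pvInsS f x (q ++ [y]) = pvInsS f x q ++ [y] := by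
  intro q
  induction q with
  | nil => simp [pvInsS, h]
  | cons z q ih =>
    simp only [List.cons_append, pvInsS]
    split_ifs <;> simp [ih]

theorem pvInsS_of_no_lt {f : List Int → Int} {x : List Int} :
    ∀ {s : List (List Int)}, (∀ z ∈ s, ¬ f x < f z) → pvInsS f x s = s ++ [x] := by
  intro s
  induction s with
  | nil => simp [pvInsS]
  | cons z s ih =>
    intro h
    simp only [pvInsS]
    rw [if_neg (h z (by simp)), ih (fun z hz => h z (by simp [hz]))]
    simp

-- swapping m[j] and m[j-1] at j = q.length + 1
theorem pvSetSwap (q : List (List Int)) (y x : List Int) (rest : List (List Int)) :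
    ((q ++ y :: x :: rest).set (q.length + 1) y).set q.length x = q ++ x :: y :: rest := by
  induction q with
  | nil => rfl
  | cons a q ih =>
    simp only [List.cons_append, List.length_cons, List.set_cons_succ]
    rw [ih]

-- the inner bubbling loop, on a sorted prefix p followed by x, performs the stable insertion
theorem pvInner_eq (cmp : Int → Int → Bool) (column : Int) (f : List Int → Int)
    (hc : ∀ r s : List Int, cmp (pvKeyB column r) (pvKeyB column s) = decide (f r < f s)) :
    ∀ (p : List (List Int)), ∀ (x : List Int), ∀ (rest : List (List Int)),
    (∀ r ∈ p ++ x :: rest, PySem.Raise.InRange r.length column) →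
    p.Pairwise (fun a b => f a ≤ f b) →
    pvInner cmp column (p ++ x :: rest) p.length = some (pvInsS f x p ++ rest) := by
  intro p
  induction p using List.reverseRecOn with
  | nil => intro x rest _ _; simp [pvInner, pvInsS]
  | append_singleton q y ih =>
    intro x rest hR hs
    have hlen : (q ++ [y]).length = q.length + 1 := by simp
    rw [hlen]
    have hget1 : (q ++ [y] ++ x :: rest)[q.length + 1]? = some x := by
      rw [List.append_assoc]
      rw [List.getElem?_append_right (by simp)]
      simp
    have hget0 : (q ++ [y] ++ x :: rest)[q.length + 1 - 1]? = some y := by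
      rw [List.append_assoc]
      rw [List.getElem?_append_right (by simp)]
      simp
    have hRx : PySem.Raise.InRange x.length column := hR x (by simp)
    have hRy : PySem.Raise.InRange y.length column := hR y (by simp)
    have hqy : ∀ z ∈ q, f z ≤ f y := by
      intro z hz
      have := (List.pairwise_append.mp hs).2.2 z hz y (by simp)
      exact this
    have hsq : q.Pairwise (fun a b => f a ≤ f b) := (List.pairwise_append.mp hs).1
    rw [pvInner, pvStep, hget1, hget0]
    simp only [Option.bind_some, pvKeyB_some hRx, pvKeyB_some hRy, hc]
    by_cases hxy : f x < f y
    · rw [if_pos (by simpa using hxy)]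
      have hswap :
          (((q ++ [y] ++ x :: rest).set (q.length + 1) y).set (q.length + 1 - 1) x)
            = q ++ x :: (y :: rest) := by
        simpa using pvSetSwap q y x rest
      rw [hswap]
      rw [ih x (y :: rest)
        (by intro r hr; apply hR; simp at hr ⊢; tauto) hsq]
      rw [pvInsS_append_last hxy]
      simp
    · rw [if_neg (by simpa using hxy)]
      have hy : pvInner cmp column (q ++ y :: (x :: rest)) q.length
          = some (pvInsS f y q ++ x :: rest) :=
        ih y (x :: rest) (by intro r hr; apply hR; simp at hr ⊢; tauto) hsq
      have hyq : pvInsS f y q = q ++ [y] := pvInsS_of_no_lt (by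
        intro z hz; have := hqy z hz; omega)
      have hnoq : ∀ z ∈ q ++ [y], ¬ f x < f z := by
        intro z hz
        rcases (by simpa using hz : z ∈ q ∨ z = y) with hz | rfl
        · have := hqy z hz; omega
        · omega
      rw [show q ++ [y] ++ x :: rest = q ++ y :: (x :: rest) by simp]
      rw [hy, hyq, pvInsS_of_no_lt hnoq]
      simp

-- the outer loop performs a left fold of stable insertions
theorem pvOuter_eq (cmp : Int → Int → Bool) (column : Int) (f : List Int → Int)
    (hc : ∀ r s : List Int, cmp (pvKeyB column r) (pvKeyB column s) = decide (f r < f s)) :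
    ∀ (xs p : List (List Int)) (_hR : ∀ r ∈ p ++ xs, PySem.Raise.InRange r.length column)
      (_hs : p.Pairwise (fun a b => f a ≤ f b)),
    pvOuter cmp column (p.length + xs.length) (p ++ xs) p.length
      = some (xs.foldl (fun s x => pvInsS f x s) p) := by
  intro xs
  induction xs with
  | nil => intro p _ _; rw [pvOuter]; simp
  | cons x rest ih =>
    intro p hR hs
    rw [pvOuter, dif_pos (by simp)]
    rw [pvInner_eq cmp column f hc p x rest hR hs]
    simp only [Option.bind_some]
    have h1 : p.length + 1 = (pvInsS f x p).length := by rw [length_pvInsS]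
    have h2 : p.length + (x :: rest).length = (pvInsS f x p).length + rest.length := by
      rw [length_pvInsS]; simp; omega
    rw [h1, h2,
      ih (pvInsS f x p)
        (by intro r hr
            simp only [List.mem_append] at hr
            rcases hr with hr | hr
            · rcases mem_pvInsS.mp hr with rfl | hr
              · exact hR r (by simp)
              · exact hR r (by simp [hr])
            · exact hR r (by simp [hr]))
        (pairwise_pvInsS hs)]
    simp [List.foldl_cons]

-- stable ≤-insertion from the left: x goes before the first y with f x ≤ f y
def pvOrdL (f : List Int → Int) (x : List Int) : List (List Int) → List (List Int)
  | [] => [x]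
  | y :: ys => if f x ≤ f y then x :: y :: ys else y :: pvOrdL f x ys

theorem pvOrdL_append {f : List Int → Int} {x : List Int} {l₁ : List (List Int)}
    (h : ∀ b ∈ l₁, ¬ f x ≤ f b) (t : List (List Int)) :
    pvOrdL f x (l₁ ++ t) = l₁ ++ pvOrdL f x t := by
  induction l₁ with
  | nil => simp
  | cons z l ih =>
    simp only [List.cons_append, pvOrdL]
    rw [if_neg (h z (by simp)), ih (fun b hb => h b (by simp [hb]))]

theorem pvOrdL_cons {f : List Int → Int} {x : List Int} {l₂ : List (List Int)}
    (h : ∀ b ∈ l₂, f x ≤ f b) : pvOrdL f x l₂ = x :: l₂ := by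
  cases l₂ with
  | nil => rfl
  | cons c t => simp [pvOrdL, h c (by simp)]

theorem mergeSort_cons_pvOrdL (f : List Int → Int) (x : List Int) (l : List (List Int)) :
    List.mergeSort (x :: l) (fun r s => decide (f r ≤ f s))
      = pvOrdL f x (List.mergeSort l (fun r s => decide (f r ≤ f s))) := by
  have htrans : ∀ a b c : List Int,
      (fun r s => decide (f r ≤ f s)) a b = true →
      (fun r s => decide (f r ≤ f s)) b c = true →
      (fun r s => decide (f r ≤ f s)) a c = true := by
    intro a b c h1 h2; simp at h1 h2 ⊢; omega
  have htotal : ∀ a b : List Int,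
      ((fun r s => decide (f r ≤ f s)) a b || (fun r s => decide (f r ≤ f s)) b a) = true := by
    intro a b; simp; omega
  obtain ⟨l₁, l₂, h1, h2, h3⟩ := List.mergeSort_cons htrans htotal x l
  have hp := List.pairwise_mergeSort htrans htotal (x :: l)
  rw [h1] at hp
  have hxl₂ : ∀ b ∈ l₂, f x ≤ f b := by
    have := (List.pairwise_append.mp hp).2.1
    rw [List.pairwise_cons] at this
    intro b hb
    have := this.1 b hb
    simpa using this
  have hl₁ : ∀ b ∈ l₁, ¬ f x ≤ f b := by
    intro b hb
    have := h3 b hb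
    simpa using this
  rw [h1, h2, pvOrdL_append hl₁, pvOrdL_cons hxl₂]

-- stable strict-insert (of the later element) commutes with ≤-insert (of the earlier element)
theorem pvInsS_pvOrdL_comm (f : List Int → Int) (x y : List Int) :
    ∀ (s : List (List Int)), pvInsS f y (pvOrdL f x s) = pvOrdL f x (pvInsS f y s) := by
  intro s
  induction s with
  | nil =>
    simp only [pvOrdL, pvInsS]
    split_ifs with h1 h2 h2 <;> first | rfl | omega
  | cons z s ih =>
    simp only [pvOrdL, pvInsS]
    split_ifs with h1 h2 h2 <;>
      simp only [pvOrdL, pvInsS] <;>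
      split_ifs <;>
      first | rfl | omega | (rw [ih])

theorem foldl_pvOrdL (f : List Int → Int) (x : List Int) :
    ∀ (xs : List (List Int)) (s : List (List Int)),
    xs.foldl (fun s y => pvInsS f y s) (pvOrdL f x s)
      = pvOrdL f x (xs.foldl (fun s y => pvInsS f y s) s) := by
  intro xs
  induction xs with
  | nil => intro s; simp
  | cons y ys ih =>
    intro s
    simp only [List.foldl_cons]
    rw [pvInsS_pvOrdL_comm, ih]

theorem isortL_eq_mergeSort (f : List Int → Int) :
    ∀ (xs : List (List Int)),
    xs.foldl (fun s y => pvInsS f y s) []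
      = List.mergeSort xs (fun r s => decide (f r ≤ f s)) := by
  intro xs
  induction xs with
  | nil => simp
  | cons x rest ih =>
    rw [List.foldl_cons, mergeSort_cons_pvOrdL]
    rw [← ih]
    have : pvInsS f x [] = pvOrdL f x [] := rfl
    rw [this, foldl_pvOrdL]

-- B's merge is core List.merge
theorem pvMerge_eq_merge (column : Int) (mode : String) :
    ∀ (n : Nat) (l r : List (List Int)), l.length + r.length ≤ n →
    pvMerge column mode l r = List.merge l r (pvKeep column mode) := by
  intro n
  induction n with
  | zero =>
    intro l r h
    have : l = [] := by cases l <;> simp_all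
    subst this
    simp [pvMerge, List.nil_merge]
  | succ n ih =>
    intro l r h
    match l, r with
    | [], r => simp [pvMerge, List.nil_merge]
    | x :: l, [] => simp [pvMerge, List.merge_right]
    | x :: l, y :: r =>
      rw [pvMerge, List.cons_merge_cons]
      simp only [List.length_cons] at h
      split_ifs with hk
      · rw [ih l (y :: r) (by simp; omega)]
      · rw [ih (x :: l) r (by simp; omega)]

-- B's recursion is core List.mergeSort
theorem pvMsort_eq_mergeSort (column : Int) (mode : String) :
    ∀ (n : Nat) (rows : List (List Int)), rows.length ≤ n →
    pvMsort column mode rows = List.mergeSort rows (pvKeep column mode) := by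
  intro n
  induction n with
  | zero =>
    intro rows h
    have : rows = [] := by cases rows <;> simp_all
    subst this
    rw [pvMsort]; simp
  | succ n ih =>
    intro rows h
    match rows with
    | [] => rw [pvMsort]; simp
    | [a] => rw [pvMsort]; simp
    | a :: b :: l =>
      rw [pvMsort, dif_neg (by simp)]
      rw [List.mergeSort]
      rw [List.MergeSort.Internal.splitInTwo_fst, List.MergeSort.Internal.splitInTwo_snd]
      simp only [List.length_cons]
      rw [ih _ (by simp only [List.length_take, List.length_cons] at h ⊢; omega),
          ih _ (by simp only [List.length_drop, List.length_cons] at h ⊢; omega),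
          pvMerge_eq_merge column mode (((a :: b :: l).take ((l.length + 1 + 1 + 1) / 2)).length
            + ((a :: b :: l).drop ((l.length + 1 + 1 + 1) / 2)).length) _ _ (by simp)]

-- one recognized mode, fully assembled
theorem matrixSort_mode (column : Int) (mode : String) (matrix : List (List Int))
    (cmp : Int → Int → Bool) (f : List Int → Int)
    (hc : ∀ r s : List Int, cmp (pvKeyB column r) (pvKeyB column s) = decide (f r < f s))
    (hk : pvKeep column mode = fun r s => decide (f r ≤ f s))
    (hR : 2 ≤ matrix.length → ∀ row ∈ matrix, PySem.Raise.InRange row.length column) :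
    pvOuter cmp column (pvListLen (pvCopy matrix)) (pvCopy matrix) 1
      = some (pvMsort column mode matrix) := by
  rw [pvCopy_eq]
  rw [pvMsort_eq_mergeSort column mode matrix.length matrix (le_refl _), hk]
  match matrix with
  | [] => simp [pvOuter, pvListLen]
  | [x] => simp [pvOuter, pvListLen]
  | x :: y :: rest =>
    have h := pvOuter_eq cmp column f hc (y :: rest) [x]
      (by intro r hr; exact hR (by simp) r (by simpa using hr))
      (by simp)
    simp only [List.length_nil, List.length_cons, List.singleton_append, Nat.zero_add] at h
    have hn : pvListLen (x :: y :: rest) = 1 + (rest.length + 1) := by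
      simp [pvListLen]; omega
    rw [hn, h, ← isortL_eq_mergeSort]
    rfl

-- ===== VERDICT (by name: the statement is the Claim_ definition above) =====
theorem matrixSort_spec : Claim_equal_matrixSort := by
  intro matrix column mode _hdom hpre
  unfold Spec_matrixSort matrixSort matrixSort_alt
  by_cases hA : mode = "a"
  · subst hA
    simp only [beq_self_eq_true, if_pos, Bool.true_or]
    exact matrixSort_mode column "a" matrix _ (pvKeyB column)
      (fun r s => rfl)
      (by funext r s; simp [pvKeep])
      (fun h2 => hpre (Or.inl rfl) h2)
  · by_cases hD : mode = "d"
    · subst hD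
      simp only [show (("d" : String) == "a") = false from rfl, Bool.false_eq_true, if_false,
        beq_self_eq_true, if_pos, Bool.or_true]
      exact matrixSort_mode column "d" matrix _ (fun r => -(pvKeyB column r))
        (by intro r s; simp)
        (by funext r s; simp [pvKeep])
        (fun h2 => hpre (Or.inr rfl) h2)
    · have h1 : (mode == "a") = false := by simpa using hA
      have h2 : (mode == "d") = false := by simpa using hD
      simp [h1, h2]
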